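-- pv_equiv track=rewrite | github.com/zahrasafdari/labs109 | labs109.py | calkin_wilf
-- ===== SOURCE A (Python) =====
-- def calkin_wilf(n):
--     #initialize the first subsistence
--     lst = [(1, 1)]
--     #initialize pivot with 1
--     pivot = 1
--     while pivot < n:
--         #pop the first tuple in the list and break it into 2 parts which represent nominator and dominator
--         p, q = lst.pop(0)
--         #To append two new tuples to the end of lst. The first tuple has p as the first element and p + lst as the second element. The second tuple has p + lst as the first element and lst as the second element
--         lst.append((p, p + q))
--         lst.append((p + q, q))
--         #increase the pivot
--         pivot += 1
--     #break the first element of the list into nominators and dominators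
--     p, q = lst[0]
--     #return the result
--     return f'{p}/{q}'
-- ===== SOURCE B (Python) =====
-- def calkin_wilf(n):
--     # Walk the binary representation of n down the Calkin-Wilf tree from (1,1): O(log n).
--     if n <= 1:
--         return '1/1'
--     p, q = 1, 1
--     for bit in bin(n)[3:]:
--         if bit == '1':
--             p = p + q
--         else:
--             q = p + q
--     return f'{p}/{q}'
-- ===== Notes on version B (the rewrite author's own statement) =====
-- stated objective: faster
-- what changed: Replaces the O(n^2) breadth-first queue simulation (n pops with O(n) list shifting) by the O(log n) descent of the Calkin-Wilf tree guided by the binary digits of n.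
import Mathlib
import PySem

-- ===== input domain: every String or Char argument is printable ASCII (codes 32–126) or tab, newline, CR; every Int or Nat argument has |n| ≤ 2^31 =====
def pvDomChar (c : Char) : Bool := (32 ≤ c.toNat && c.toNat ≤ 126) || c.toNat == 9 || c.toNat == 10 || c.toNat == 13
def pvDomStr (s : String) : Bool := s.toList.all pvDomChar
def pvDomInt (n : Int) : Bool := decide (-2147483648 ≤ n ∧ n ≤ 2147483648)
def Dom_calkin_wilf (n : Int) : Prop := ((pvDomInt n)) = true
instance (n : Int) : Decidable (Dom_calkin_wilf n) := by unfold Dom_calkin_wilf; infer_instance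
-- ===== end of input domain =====

-- B replaces A's O(n^2) queue simulation by an O(log n) binary descent of the Calkin-Wilf tree.

-- ===== PORT A =====
-- A's while-loop runs exactly (n-1).toNat times (pivot counts 1,2,… up to n);
-- each iteration pops the head and appends the two children.  The queue is never
-- empty when popped (it grows by one each step); the [] branch is unreachable.
def pvALoop : Nat → List (Int × Int) → List (Int × Int)
  | 0, lst => lst
  | k + 1, lst =>
    match lst with
    | [] => []
    | (p, q) :: rest => pvALoop k (rest ++ [(p, p + q), (p + q, q)])

def calkin_wilf (n : Int) : String :=
  let lst := pvALoop (n - 1).toNat [(1, 1)]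
  match lst with
  | (p, q) :: _ => PySem.Int.toStr p ++ "/" ++ PySem.Int.toStr q
  | [] => ""   -- unreachable: the queue is always nonempty

-- ===== PORT B =====
-- bin(n)[3:]: the binary digits of n below the leading 1, most significant first.
def pvBits (m : Nat) : List Bool :=
  if m ≤ 1 then [] else pvBits (m / 2) ++ [m % 2 == 1]
decreasing_by exact Nat.div_lt_self (by omega) (by omega)

-- one loop iteration of B: bit '1' → p := p+q, bit '0' → q := p+q
def pvStep (pq : Int × Int) (b : Bool) : Int × Int :=
  if b then (pq.1 + pq.2, pq.2) else (pq.1, pq.1 + pq.2)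

def calkin_wilf_alt (n : Int) : String :=
  if n ≤ 1 then "1/1"
  else
    let pq := (pvBits n.toNat).foldl pvStep (1, 1)
    PySem.Int.toStr pq.1 ++ "/" ++ PySem.Int.toStr pq.2

-- ===== PRECONDITION & SPEC =====
def Spec_calkin_wilf (n : Int) (out : String) : Prop := out = calkin_wilf_alt n
instance (n : Int) (out : String) : Decidable (Spec_calkin_wilf n out) := by unfold Spec_calkin_wilf; infer_instance

-- ===== CLAIM (what is proved, stated in full; the proofs are below) =====
def Claim_equal_calkin_wilf : Prop := ∀ (n : Int), Dom_calkin_wilf n → Spec_calkin_wilf n (calkin_wilf n)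

-- ===== LEMMAS AND PROOFS =====

-- the Calkin-Wilf tree node with heap index m (m ≥ 1); node 1 = (1,1),
-- node 2m = left child, node 2m+1 = right child.
def cwNode (m : Nat) : Int × Int :=
  if m ≤ 1 then (1, 1) else pvStep (cwNode (m / 2)) (m % 2 == 1)
decreasing_by exact Nat.div_lt_self (by omega) (by omega)

theorem cwNode_one : cwNode 1 = (1, 1) := by unfold cwNode; simp

theorem cwNode_left (m : Nat) (hm : 1 ≤ m) :
    cwNode (2 * m) = ((cwNode m).1, (cwNode m).1 + (cwNode m).2) := by
  rw [cwNode]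
  have h1 : ¬ 2 * m ≤ 1 := by omega
  have h2 : 2 * m / 2 = m := by omega
  have h3 : 2 * m % 2 = 0 := by omega
  simp [h1, h2, h3, pvStep]

theorem cwNode_right (m : Nat) (hm : 1 ≤ m) :
    cwNode (2 * m + 1) = ((cwNode m).1 + (cwNode m).2, (cwNode m).2) := by
  rw [cwNode]
  have h1 : ¬ 2 * m + 1 ≤ 1 := by omega
  have h2 : (2 * m + 1) / 2 = m := by omega
  have h3 : (2 * m + 1) % 2 = 1 := by omega
  simp [h1, h2, h3, pvStep]

-- B's fold over the bit list computes the m-th Calkin-Wilf node.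
theorem foldl_bits (m : Nat) (hm : 1 ≤ m) :
    (pvBits m).foldl pvStep (1, 1) = cwNode m := by
  induction m using Nat.strong_induction_on with
  | _ m ih =>
    by_cases h : m ≤ 1
    · have : m = 1 := by omega
      subst this
      rw [pvBits, cwNode]; simp
    · rw [pvBits, cwNode]
      simp only [h, if_false, List.foldl_append]
      rw [ih (m / 2) (Nat.div_lt_self (by omega) (by omega)) (by omega)]
      simp [List.foldl]

-- A's queue invariant: after k pops starting from the window [t+1 … 2t+1],
-- the queue is the window [t+k+1 … 2(t+k)+1] of Calkin-Wilf nodes.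
theorem pvALoop_window (k : Nat) : ∀ t : Nat,
    pvALoop k ((List.range' (t + 1) (t + 1)).map cwNode)
      = (List.range' (t + k + 1) (t + k + 1)).map cwNode := by
  induction k with
  | zero => intro t; rfl
  | succ k ih =>
    intro t
    have hcons : List.range' (t + 1) (t + 1) = (t + 1) :: List.range' (t + 2) t := by
      rw [List.range'_succ]
    rw [hcons]
    simp only [List.map_cons]
    rw [pvALoop]
    have hL : cwNode (2 * (t + 1)) = ((cwNode (t + 1)).1, (cwNode (t + 1)).1 + (cwNode (t + 1)).2) :=
      cwNode_left (t + 1) (by omega)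
    have hR : cwNode (2 * (t + 1) + 1) = ((cwNode (t + 1)).1 + (cwNode (t + 1)).2, (cwNode (t + 1)).2) :=
      cwNode_right (t + 1) (by omega)
    have hwin : List.range' (t + 2) (t + 2)
        = (List.range' (t + 2) t ++ [2 * (t + 1)]) ++ [2 * (t + 1) + 1] := by
      have e1 : List.range' (t + 2) (t + 1) = List.range' (t + 2) t ++ [t + 2 + t] := by
        rw [List.range'_concat]; norm_num
      have e2 : List.range' (t + 2) (t + 2) = List.range' (t + 2) (t + 1) ++ [t + 2 + (t + 1)] := by
        rw [List.range'_concat]; norm_num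
      rw [e2, e1, show t + 2 + t = 2 * (t + 1) from by omega,
        show t + 2 + (t + 1) = 2 * (t + 1) + 1 from by omega]
    have hq : (List.range' (t + 2) t).map cwNode
        ++ [((cwNode (t + 1)).1, (cwNode (t + 1)).1 + (cwNode (t + 1)).2),
            ((cwNode (t + 1)).1 + (cwNode (t + 1)).2, (cwNode (t + 1)).2)]
        = (List.range' (t + 2) (t + 2)).map cwNode := by
      rw [hwin]
      simp [hL, hR]
    have := ih (t + 1)
    rw [show t + 1 + k + 1 = t + (k + 1) + 1 by omega] at this
    rw [show t + 1 + 1 = t + 2 by omega] at this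
    calc pvALoop k ((List.range' (t + 2) t).map cwNode
            ++ [((cwNode (t + 1)).1, (cwNode (t + 1)).1 + (cwNode (t + 1)).2),
                ((cwNode (t + 1)).1 + (cwNode (t + 1)).2, (cwNode (t + 1)).2)])
        = pvALoop k ((List.range' (t + 2) (t + 2)).map cwNode) := by rw [hq]
      _ = (List.range' (t + (k + 1) + 1) (t + (k + 1) + 1)).map cwNode := this

-- A's result: the head of the final queue is cwNode n.toNat (for n ≥ 2).
theorem pvALoop_head (k : Nat) :
    pvALoop k [(1, 1)] = (List.range' (k + 1) (k + 1)).map cwNode := by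
  have h0 : ([((1 : Int), (1 : Int))] : List (Int × Int))
      = (List.range' 1 1).map cwNode := by
    simp [List.range', cwNode_one]
  rw [h0]
  have := pvALoop_window k 0
  simpa using this

-- ===== VERDICT (by name: the statement is the Claim_ definition above) =====
theorem calkin_wilf_spec : Claim_equal_calkin_wilf := by
  intro n _
  unfold Spec_calkin_wilf calkin_wilf calkin_wilf_alt
  by_cases hn : n ≤ 1
  · have h0 : (n - 1).toNat = 0 := by omega
    simp [h0, pvALoop, hn]
    decide

  · have hk : (n - 1).toNat + 1 = n.toNat := by omega
    have h1 : 1 ≤ n.toNat := by omega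
    simp only [hn, if_false]
    rw [pvALoop_head, hk]
    have hcons : List.range' n.toNat (n.toNat) = n.toNat :: List.range' (n.toNat + 1) ((n.toNat) - 1) := by
      have : n.toNat = (n.toNat - 1) + 1 := by omega
      rw [this, List.range'_succ]
      congr 1 <;> omega
    rw [hcons]
    simp only [List.map_cons]
    rw [foldl_bits n.toNat h1]
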